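-- pv_equiv track=rewrite | github.com/raquelramor92/Tarea1AriasRamirezMadrigal | Tarea_micros.py | SegundaFuncion
-- ===== SOURCE A (Python) =====
-- def Error1():
--     return "Error 1"
--
-- def SegundaFuncion(x):
--     y = "False"
--     for i in x:
--         if i.isdigit() == True:
--             return Error1()
--             break
--
--         if i == "w":
--             y = "True"
--     return y
-- ===== SOURCE B (Python) =====
-- def Error1():
--     return "Error 1"
--
-- def SegundaFuncion(x):
--     if any(c.isdigit() for c in x):
--         return Error1()
--     return "True" if "w" in x else "False"
-- ===== Notes on version B (the rewrite author's own statement) =====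
-- stated objective: idiomatic
-- what changed: Replaced A's single stateful early-return loop maintaining a flag with two independent existence checks: an any() scan for digits followed by a separate substring membership test for the target letter.
import Mathlib
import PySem

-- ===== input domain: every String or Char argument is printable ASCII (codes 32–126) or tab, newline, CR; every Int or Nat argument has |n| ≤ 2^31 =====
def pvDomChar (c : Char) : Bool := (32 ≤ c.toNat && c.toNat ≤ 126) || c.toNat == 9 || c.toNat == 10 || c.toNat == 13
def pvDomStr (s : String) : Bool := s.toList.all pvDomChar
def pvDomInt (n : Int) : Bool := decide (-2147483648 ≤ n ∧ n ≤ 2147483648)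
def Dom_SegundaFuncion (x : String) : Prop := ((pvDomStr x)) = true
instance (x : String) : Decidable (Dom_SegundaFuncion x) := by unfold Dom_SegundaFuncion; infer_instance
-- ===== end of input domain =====

-- ===== PORT A =====
-- loop: for i in x: if i.isdigit(): return Error1(); if i == 'w': y = "True"
def pvError1 : String := "Error 1"
def pvLoopA : List Char → String → String
  | [], y => y
  | i :: rest, y =>
    if PySem.Chars.isdigit i = true then pvError1
    else if i = 'w' then pvLoopA rest "True"
    else pvLoopA rest y

def SegundaFuncion (x : String) : String := pvLoopA x.toList "False"

-- ===== PORT B =====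
-- B: digit existence check first, then membership test for 'w'
def SegundaFuncion_alt (x : String) : String :=
  if x.toList.any PySem.Chars.isdigit then pvError1
  else if 'w' ∈ x.toList then "True" else "False"

-- ===== PRECONDITION & SPEC =====
def Spec_SegundaFuncion (x : String) (out : String) : Prop := out = SegundaFuncion_alt x
instance (x : String) (out : String) : Decidable (Spec_SegundaFuncion x out) := by unfold Spec_SegundaFuncion; infer_instance

-- ===== CLAIM (what is proved, stated in full; the proofs are below) =====
def Claim_equal_SegundaFuncion : Prop := ∀ (x : String), Dom_SegundaFuncion x → Spec_SegundaFuncion x (SegundaFuncion x)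

-- ===== LEMMAS AND PROOFS =====

-- ===== VERDICT (by name: the statement is the Claim_ definition above) =====
theorem pvLoopA_eq (cs : List Char) (y : String) :
    pvLoopA cs y = if cs.any PySem.Chars.isdigit then pvError1
      else if 'w' ∈ cs then "True" else y := by
  induction cs generalizing y with
  | nil => simp [pvLoopA]
  | cons c rest ih =>
    simp only [pvLoopA, List.any_cons, List.mem_cons]
    by_cases hd : PySem.Chars.isdigit c = true <;> by_cases hw : c = 'w' <;>
      simp [hd, hw, ih, show PySem.Chars.isdigit 'w' = false from by decide, @eq_comm _ 'w']

theorem SegundaFuncion_spec : Claim_equal_SegundaFuncion := by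
  intro x _
  unfold Spec_SegundaFuncion SegundaFuncion SegundaFuncion_alt
  rw [pvLoopA_eq]
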